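-- pv_equiv track=rewrite | github.com/chc-ucsb/chafs_roi | chafs_roi/tools.py | CreateNestedLinks
-- ===== SOURCE A (Python) =====
-- def CreateNestedLinks(adm_link):
--     lst = list(adm_link.items())
--     # Build a directed graph and a list of all names that have no parent
--     graph = {name: set() for tup in lst for name in tup}
--     has_parent = {name: False for tup in lst for name in tup}
--     for parent, child in lst:
--         graph[parent].add(child)
--         has_parent[child] = True
--     roots = [name for name, parents in has_parent.items() if not parents]
--     roots = sorted(roots)
--     # Nested links
--     nested = {}
--     for root in roots:
--         key = root
--         links = []
--         while root in adm_link.keys():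
--             root = adm_link[root]
--             links.append(root)
--         nested[key] = links
--     return nested
-- ===== SOURCE B (Python) =====
-- def CreateNestedLinks(adm_link):
--     # Roots are exactly the keys that never occur as a child (a child-only name
--     # has a parent, and every non-child key has none).
--     children = set(adm_link.values())
--     roots = sorted(k for k in adm_link if k not in children)
--     memo = {}  # name -> list of successors following name
--
--     def resolve(start):
--         path = []
--         cur = start
--         while cur in adm_link and cur not in memo:
--             path.append(cur)
--             cur = adm_link[cur]
--         suffix = memo.get(cur, [])
--         for node in reversed(path):
--             suffix = [adm_link[node]] + suffix
--             memo[node] = suffix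
--         return suffix
--
--     return {root: resolve(root) for root in roots}
-- ===== Notes on version B (the rewrite author's own statement) =====
-- stated objective: alternative
-- what changed: B computes the roots directly as keys that never occur as a value (one set of the values) instead of building A's graph and has_parent dicts, and resolves each chain once with a memo of suffix chains that is reused across roots instead of re-walking the links from every root.
import Mathlib
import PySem

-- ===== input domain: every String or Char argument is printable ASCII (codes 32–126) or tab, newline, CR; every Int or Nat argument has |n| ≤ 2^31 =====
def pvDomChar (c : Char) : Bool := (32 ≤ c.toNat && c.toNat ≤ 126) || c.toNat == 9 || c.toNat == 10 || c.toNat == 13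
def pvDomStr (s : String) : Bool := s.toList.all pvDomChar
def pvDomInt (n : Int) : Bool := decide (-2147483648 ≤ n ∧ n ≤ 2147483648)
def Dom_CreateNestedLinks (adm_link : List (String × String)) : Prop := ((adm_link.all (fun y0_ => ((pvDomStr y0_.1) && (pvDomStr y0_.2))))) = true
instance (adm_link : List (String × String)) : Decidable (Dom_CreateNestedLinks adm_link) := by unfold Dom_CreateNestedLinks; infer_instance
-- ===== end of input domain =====

-- B replaces A's graph/has_parent dicts by roots = keys − values and memoizes each node's
-- suffix chain so every link is walked once (objective: alternative; equal return values).
-- Both programs loop forever on a cycle reachable from a key; Pre_ excludes exactly those inputs.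

-- ===== PORT A =====
-- the while loop 'while root in adm_link: root = adm_link[root]; links.append(root)',
-- with fuel; under Pre_ the loop condition fails within d.size steps, so fuel d.size+1 is exact
def pvChainLoopA (d : PySem.Dict String String) : Nat → String → List String → List String
  | 0, _, links => links
  | fuel + 1, root, links =>
    match d.get? root with
    | some nxt => pvChainLoopA d fuel nxt (links ++ [nxt])
    | none => links

def CreateNestedLinks (adm_link : List (String × String)) : List (String × List String) :=
  let d : PySem.Dict String String := PySem.Dict.ofList adm_link
  let lst := d.items
  -- graph = {name: set() for tup in lst for name in tup}  (dead in A, kept for faithfulness)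
  let graph : PySem.Dict String (PySem.Set String) :=
    lst.foldl (fun g t => (g.insert t.1 PySem.Set.empty).insert t.2 PySem.Set.empty) PySem.Dict.empty
  -- has_parent = {name: False for tup in lst for name in tup}
  let hasParent : PySem.Dict String Bool :=
    lst.foldl (fun h t => (h.insert t.1 false).insert t.2 false) PySem.Dict.empty
  -- for parent, child in lst: graph[parent].add(child); has_parent[child] = True
  -- (graph[parent] always exists here, so modify with default is exact)
  let _graph := lst.foldl (fun g t => PySem.Dict.modify g t.1 PySem.Set.empty (fun s => PySem.Set.add s t.2)) graph
  let hasParent := lst.foldl (fun h t => h.insert t.2 true) hasParent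
  let roots := (hasParent.items.filter (fun p => !p.2)).map (·.1)
  let roots := PySem.List.sorted roots (fun x => x) false
  let nested := roots.foldl (fun n root => n.insert root (pvChainLoopA d (d.size + 1) root [])) PySem.Dict.empty
  nested.items

-- ===== PORT B =====
-- the while loop of resolve: collects path and returns the stopping cursor;
-- same fuel bound d.size+1, exact under Pre_
def pvWalkB (d : PySem.Dict String String) (memo : PySem.Dict String (List String)) :
    Nat → String → List String × String
  | 0, cur => ([], cur)
  | fuel + 1, cur =>
    if d.contains cur && !(memo.contains cur) then
      let res := pvWalkB d memo fuel ((d.get? cur).getD cur)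
      (cur :: res.1, res.2)
    else ([], cur)

-- 'for node in reversed(path): suffix = [adm_link[node]] + suffix; memo[node] = suffix'
def pvUnwindB (d : PySem.Dict String String)
    (st : PySem.Dict String (List String) × List String) (node : String) :
    PySem.Dict String (List String) × List String :=
  let s := PySem.Dict.getD d node "" :: st.2
  (st.1.insert node s, s)

def pvResolveB (d : PySem.Dict String String) (memo : PySem.Dict String (List String))
    (fuel : Nat) (start : String) : PySem.Dict String (List String) × List String :=
  let w := pvWalkB d memo fuel start
  (w.1.reverse).foldl (pvUnwindB d) (memo, PySem.Dict.getD memo w.2 [])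

def CreateNestedLinks_alt (adm_link : List (String × String)) : List (String × List String) :=
  let d : PySem.Dict String String := PySem.Dict.ofList adm_link
  let children : PySem.Set String := PySem.Set.ofList d.values
  let roots := PySem.List.sorted (d.keys.filter (fun k => !(PySem.Set.contains children k))) (fun x => x) false
  let st := roots.foldl
    (fun (st : PySem.Dict String (List String) × PySem.Dict String (List String)) r =>
      let res := pvResolveB d st.1 (d.size + 1) r
      (res.1, st.2.insert r res.2))
    (PySem.Dict.empty, PySem.Dict.empty)
  st.2.items

-- ===== PRECONDITION & SPEC =====
def pvStep (d : PySem.Dict String String) (k : String) : String := (d.get? k).getD k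

-- Pre_ excludes exactly the inputs on which A (and B) never returns: a root (a key that never
-- occurs as a value) whose successor chain enters a cycle; stated as 'following d.size links
-- from any such key leaves the keys' (a terminating chain visits distinct keys, so d.size steps suffice).
def Pre_CreateNestedLinks (adm_link : List (String × String)) : Prop :=
  ∀ k ∈ (PySem.Dict.ofList adm_link : PySem.Dict String String).keys,
    k ∉ (PySem.Dict.ofList adm_link : PySem.Dict String String).values →
    (PySem.Dict.ofList adm_link : PySem.Dict String String).contains
      ((pvStep (PySem.Dict.ofList adm_link))^[(PySem.Dict.ofList adm_link : PySem.Dict String String).size] k) = false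
instance (adm_link : List (String × String)) : Decidable (Pre_CreateNestedLinks adm_link) := by
  unfold Pre_CreateNestedLinks; infer_instance

def pvWitness_CreateNestedLinks : (List (String × String)) := [("a", "b"), ("b", "c")]

def Spec_CreateNestedLinks (adm_link : List (String × String)) (out : List (String × List String)) : Prop := out = CreateNestedLinks_alt adm_link
instance (adm_link : List (String × String)) (out : List (String × List String)) : Decidable (Spec_CreateNestedLinks adm_link out) := by unfold Spec_CreateNestedLinks; infer_instance

-- ===== CLAIM (what is proved, stated in full; the proofs are below) =====
def Claim_equal_CreateNestedLinks : Prop := ∀ (adm_link : List (String × String)), Dom_CreateNestedLinks adm_link → Pre_CreateNestedLinks adm_link → Spec_CreateNestedLinks adm_link (CreateNestedLinks adm_link)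

-- ===== LEMMAS AND PROOFS =====

-- the canonical chain from k, with fuel
def pvChain (d : PySem.Dict String String) : Nat → String → List String
  | 0, _ => []
  | fuel + 1, k =>
    match d.get? k with
    | some v => v :: pvChain d fuel v
    | none => []

-- A's loop is the canonical chain appended to the accumulator
theorem pvChainLoopA_eq (d : PySem.Dict String String) :
    ∀ (fuel : Nat) (k : String) (acc : List String),
      pvChainLoopA d fuel k acc = acc ++ pvChain d fuel k := by
  intro fuel
  induction fuel with
  | zero => intro k acc; simp [pvChainLoopA, pvChain]
  | succ f ih =>
    intro k acc
    cases hg : d.get? k with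
    | none => simp [pvChainLoopA, pvChain, hg]
    | some v => simp [pvChainLoopA, pvChain, hg, ih]

-- fuel stability: once the cursor has left the keys after j steps, fuel ≥ j does not matter
theorem pvChain_stable (d : PySem.Dict String String) :
    ∀ (j : Nat) (k : String), d.contains ((pvStep d)^[j] k) = false →
      ∀ f, j ≤ f → pvChain d f k = pvChain d j k := by
  intro j
  induction j with
  | zero =>
    intro k hk f _
    have hg : d.get? k = none := (PySem.Dict.get?_eq_none_iff_contains d k).2 hk
    cases f with
    | zero => rfl
    | succ f => simp [pvChain, hg]
  | succ j ih =>
    intro k hk f hf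
    cases hg : d.get? k with
    | none =>
      cases f with
      | zero => omega
      | succ f => simp [pvChain, hg]
    | some v =>
      have hstep : pvStep d k = v := by simp [pvStep, hg]
      have hk' : d.contains ((pvStep d)^[j] v) = false := by
        rw [Function.iterate_succ_apply, hstep] at hk; exact hk
      cases f with
      | zero => omega
      | succ f =>
        simp only [pvChain, hg]
        rw [ih v hk' f (by omega)]

-- the canonical chain with the fuel both ports use
def pvCH (d : PySem.Dict String String) (k : String) : List String := pvChain d (d.size + 1) k

theorem pvCH_of_none (d : PySem.Dict String String) {k : String}
    (hg : d.get? k = none) : pvCH d k = [] := by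
  simp [pvCH, pvChain, hg]

theorem pvCH_unfold (d : PySem.Dict String String) {k v : String}
    (hg : d.get? k = some v) (j : Nat) (hjs : j ≤ d.size)
    (hterm : d.contains ((pvStep d)^[j] v) = false) :
    pvCH d k = v :: pvCH d v := by
  have h1 : pvChain d (d.size + 1) v = pvChain d j v :=
    pvChain_stable d j v hterm (d.size + 1) (by omega)
  have h2 : pvChain d d.size v = pvChain d j v :=
    pvChain_stable d j v hterm d.size (by omega)
  show pvChain d (d.size + 1) k = v :: pvChain d (d.size + 1) v
  rw [h1, ← h2]
  simp [pvChain, hg]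

-- the memo only ever stores canonical chains
def pvChainInv (d : PySem.Dict String String) (memo : PySem.Dict String (List String)) : Prop :=
  ∀ k v, memo.get? k = some v → v = pvCH d k

theorem pvResolveB_stop (d : PySem.Dict String String) (memo : PySem.Dict String (List String))
    (fuel : Nat) (cur : String) (h : (d.contains cur && !(memo.contains cur)) = false) :
    pvResolveB d memo fuel cur = (memo, PySem.Dict.getD memo cur []) := by
  cases fuel with
  | zero => rfl
  | succ f => simp [pvResolveB, pvWalkB, h]

theorem pvResolveB_step (d : PySem.Dict String String) (memo : PySem.Dict String (List String))
    (fuel : Nat) (cur v : String) (hc : d.contains cur = true) (hm : memo.contains cur = false)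
    (hg : d.get? cur = some v) :
    pvResolveB d memo (fuel + 1) cur =
      ((pvResolveB d memo fuel v).1.insert cur (v :: (pvResolveB d memo fuel v).2),
       v :: (pvResolveB d memo fuel v).2) := by
  have hgd : PySem.Dict.getD d cur "" = v := by
    rw [PySem.Dict.getD_eq_get?_getD, hg]; rfl
  simp only [pvResolveB, pvWalkB, hc, hm, Bool.not_false, Bool.and_self, hg,
    Option.getD_some]
  simp [pvUnwindB, hgd]

theorem pvResolveB_spec (d : PySem.Dict String String) :
    ∀ (fuel : Nat), fuel ≤ d.size + 1 → ∀ (j : Nat), j < fuel →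
      ∀ (cur : String) (memo : PySem.Dict String (List String)),
      pvChainInv d memo →
      d.contains ((pvStep d)^[j] cur) = false →
      (pvResolveB d memo fuel cur).2 = pvCH d cur ∧
      pvChainInv d (pvResolveB d memo fuel cur).1 := by
  intro fuel
  induction fuel with
  | zero => intro _ j hj; omega
  | succ f ih =>
    intro hfs j hj cur memo hInv hterm
    by_cases hcond : (d.contains cur && !(memo.contains cur)) = true
    · have hc : d.contains cur = true := by
        revert hcond; cases d.contains cur <;> simp
      have hm : memo.contains cur = false := by
        revert hcond; cases memo.contains cur <;> simp
      obtain ⟨v, hg⟩ : ∃ v, d.get? cur = some v := by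
        have h1 := PySem.Dict.contains_eq_isSome_get? d cur
        rw [hc] at h1
        cases hgo : d.get? cur with
        | none => rw [hgo] at h1; simp at h1
        | some v => exact ⟨v, rfl⟩
      have hj0 : j ≠ 0 := by
        intro h0; rw [h0] at hterm; simp at hterm; rw [hterm] at hc; cases hc
      obtain ⟨j', rfl⟩ : ∃ j', j = j' + 1 := ⟨j - 1, by omega⟩
      have hstep : pvStep d cur = v := by simp [pvStep, hg]
      have hterm' : d.contains ((pvStep d)^[j'] v) = false := by
        rw [Function.iterate_succ_apply, hstep] at hterm; exact hterm
      obtain ⟨hs1, hInv1⟩ := ih (by omega) j' (by omega) v memo hInv hterm'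
      have hCH : pvCH d cur = v :: pvCH d v := pvCH_unfold d hg j' (by omega) hterm'
      rw [pvResolveB_step d memo f cur v hc hm hg]
      constructor
      · simp only [hs1]
        exact hCH.symm
      · intro k w hkw
        rw [PySem.Dict.get?_insert] at hkw
        by_cases hkc : k = cur
        · rw [if_pos hkc] at hkw
          cases hkw
          rw [hkc, hs1]
          exact hCH.symm
        · rw [if_neg hkc] at hkw
          exact hInv1 k w hkw
    · have hcond' : (d.contains cur && !(memo.contains cur)) = false := by
        revert hcond; cases (d.contains cur && !(memo.contains cur)) <;> simp
      rw [pvResolveB_stop d memo (f + 1) cur hcond']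
      refine ⟨?_, hInv⟩
      cases hmc : memo.contains cur with
      | true =>
        obtain ⟨s, hs⟩ : ∃ s, memo.get? cur = some s := by
          have h1 := PySem.Dict.contains_eq_isSome_get? memo cur
          rw [hmc] at h1
          cases hgo : memo.get? cur with
          | none => rw [hgo] at h1; simp at h1
          | some s => exact ⟨s, rfl⟩
        rw [PySem.Dict.getD_eq_get?_getD, hs]
        simp only [Option.getD_some]
        exact hInv cur s hs
      | false =>
        have hc : d.contains cur = false := by
          revert hcond'; rw [hmc]; cases d.contains cur <;> simp
        rw [PySem.Dict.getD_of_not_contains memo [] hmc]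
        exact (pvCH_of_none d ((PySem.Dict.get?_eq_none_iff_contains d cur).2 hc)).symm

-- B's threaded fold produces exactly the dict of canonical chains
theorem pvFoldB_eq (d : PySem.Dict String String) :
    ∀ (rs : List String),
      (∀ r ∈ rs, d.contains ((pvStep d)^[d.size] r) = false) →
      ∀ (st : PySem.Dict String (List String) × PySem.Dict String (List String)),
      pvChainInv d st.1 →
      (rs.foldl
        (fun (st : PySem.Dict String (List String) × PySem.Dict String (List String)) r =>
          let res := pvResolveB d st.1 (d.size + 1) r
          (res.1, st.2.insert r res.2)) st).2 =
      rs.foldl (fun n r => n.insert r (pvCH d r)) st.2 := by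
  intro rs
  induction rs with
  | nil => intro _ st _; rfl
  | cons r rs ih =>
    intro hroots st hInv
    obtain ⟨hs, hInv'⟩ := pvResolveB_spec d (d.size + 1) (by omega) d.size (by omega) r st.1 hInv
      (hroots r (List.mem_cons_self))
    simp only [List.foldl_cons]
    rw [ih (fun x hx => hroots x (List.mem_cons_of_mem r hx)) _ hInv', hs]

-- value of has_parent after the initialising comprehension
theorem hasParent_init_get? :
    ∀ (l : List (String × String)) (h : PySem.Dict String Bool) (x : String),
      ((l.foldl (fun h t => (h.insert t.1 false).insert t.2 false) h).get? x) =
        if x ∈ l.map (·.1) ∨ x ∈ l.map (·.2) then some false else h.get? x := by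
  intro l
  induction l with
  | nil => intro h x; simp
  | cons t l ih =>
    intro h x
    simp only [List.foldl_cons, List.map_cons, List.mem_cons]
    rw [ih]
    by_cases hx : x ∈ l.map (·.1) ∨ x ∈ l.map (·.2)
    · rw [if_pos hx, if_pos (by tauto)]
    · rw [if_neg hx, PySem.Dict.get?_insert, PySem.Dict.get?_insert]
      by_cases h2 : x = t.2
      · rw [if_pos h2, if_pos (by tauto)]
      · rw [if_neg h2]
        by_cases h1 : x = t.1
        · rw [if_pos h1, if_pos (by tauto)]
        · rw [if_neg h1, if_neg (by tauto)]

-- value of has_parent after the 'has_parent[child] = True' loop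
theorem hasParent_mark_get? :
    ∀ (l : List (String × String)) (h : PySem.Dict String Bool) (x : String),
      ((l.foldl (fun h t => h.insert t.2 true) h).get? x) =
        if x ∈ l.map (·.2) then some true else h.get? x := by
  intro l
  induction l with
  | nil => intro h x; simp
  | cons t l ih =>
    intro h x
    simp only [List.foldl_cons, List.map_cons, List.mem_cons]
    rw [ih]
    by_cases hx : x ∈ l.map (·.2)
    · rw [if_pos hx, if_pos (by tauto)]
    · rw [if_neg hx, PySem.Dict.get?_insert]
      by_cases h2 : x = t.2
      · rw [if_pos h2, if_pos (by tauto)]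
      · rw [if_neg h2, if_neg (by tauto)]

theorem hasParent_init_nodup :
    ∀ (l : List (String × String)) (h : PySem.Dict String Bool), h.keys.Nodup →
      ((l.foldl (fun h t => (h.insert t.1 false).insert t.2 false) h)).keys.Nodup := by
  intro l
  induction l with
  | nil => intro h hh; exact hh
  | cons t l ih =>
    intro h hh
    exact ih _ (PySem.Dict.nodup_keys_insert _ _ _ (PySem.Dict.nodup_keys_insert _ _ _ hh))

-- the two sorted root lists coincide
theorem roots_eq (adm_link : List (String × String)) :
    PySem.List.sorted
      ((((PySem.Dict.ofList adm_link : PySem.Dict String String).items.foldl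
            (fun h t => h.insert t.2 true)
            ((PySem.Dict.ofList adm_link : PySem.Dict String String).items.foldl
              (fun h t => (h.insert t.1 false).insert t.2 false) PySem.Dict.empty)).items.filter
          (fun p => !p.2)).map (·.1)) (fun x => x) false =
    PySem.List.sorted
      ((PySem.Dict.ofList adm_link : PySem.Dict String String).keys.filter
        (fun k => !(PySem.Set.contains (PySem.Set.ofList (PySem.Dict.ofList adm_link : PySem.Dict String String).values) k)))
      (fun x => x) false := by
  set d : PySem.Dict String String := PySem.Dict.ofList adm_link with hd
  set hp : PySem.Dict String Bool :=
    d.items.foldl (fun h t => h.insert t.2 true)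
      (d.items.foldl (fun h t => (h.insert t.1 false).insert t.2 false) PySem.Dict.empty) with hhp
  have hpnd : hp.keys.Nodup := by
    rw [hhp]
    exact PySem.Dict.nodup_keys_foldl_insert_key _ (fun t : String × String => t.2) (fun _ _ => true) _
      (hasParent_init_nodup _ _ PySem.Dict.nodup_keys_empty)
  have hget : ∀ x, hp.get? x = some false ↔ (x ∈ d.keys ∧ x ∉ d.values) := by
    intro x
    rw [hhp, hasParent_mark_get?, hasParent_init_get?]
    have hk : List.map (fun p : String × String => p.1) d.items = d.keys := rfl
    have hv : List.map (fun p : String × String => p.2) d.items = d.values := rfl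
    rw [hk, hv]
    by_cases hxv : x ∈ d.values
    · simp [hxv]
    · by_cases hxk : x ∈ d.keys
      · simp [hxv, hxk]
      · simp [hxv, hxk, PySem.Dict.get?_empty]
  set RA : List String := (hp.items.filter (fun p => !p.2)).map (fun p : String × Bool => p.1) with hRA
  set RB : List String :=
    d.keys.filter (fun k => !(PySem.Set.contains (PySem.Set.ofList d.values) k)) with hRB
  have hmemA : ∀ x, x ∈ RA ↔ (x ∈ d.keys ∧ x ∉ d.values) := by
    intro x
    rw [hRA]
    constructor
    · intro hx
      obtain ⟨p, hp1, hp2⟩ := List.mem_map.1 hx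
      obtain ⟨hpi, hpb⟩ := List.mem_filter.1 hp1
      have hpf : p.2 = false := by revert hpb; cases p.2 <;> simp
      have hsome : hp.get? x = some false := by
        rw [← hp2, ← hpf]
        exact (PySem.Dict.get?_eq_some_iff_mem_items hp p.1 p.2 hpnd).2 hpi
      exact (hget x).1 hsome
    · intro hx
      have hmem : (x, false) ∈ hp.items :=
        (PySem.Dict.get?_eq_some_iff_mem_items hp x false hpnd).1 ((hget x).2 hx)
      exact List.mem_map.2 ⟨(x, false), List.mem_filter.2 ⟨hmem, by simp⟩, rfl⟩
  have hmemB : ∀ x, x ∈ RB ↔ (x ∈ d.keys ∧ x ∉ d.values) := by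
    intro x
    rw [hRB, List.mem_filter]
    constructor
    · rintro ⟨h1, h2⟩
      refine ⟨h1, fun hv => ?_⟩
      have hc : PySem.Set.contains (PySem.Set.ofList d.values) x = true :=
        (PySem.Set.contains_iff _ _).2 ((PySem.Set.mem_ofList _ _).2 hv)
      rw [hc] at h2; cases h2
    · rintro ⟨h1, h2⟩
      refine ⟨h1, ?_⟩
      cases hc : PySem.Set.contains (PySem.Set.ofList d.values) x with
      | false => rfl
      | true =>
        exact absurd ((PySem.Set.mem_ofList _ _).1 ((PySem.Set.contains_iff _ _).1 hc)) h2
  have hndA : RA.Nodup := by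
    rw [hRA]
    have hsub : List.Sublist ((hp.items.filter (fun p => !p.2)).map (fun p : String × Bool => p.1))
        (hp.items.map (fun p : String × Bool => p.1)) :=
      List.Sublist.map _ List.filter_sublist
    exact hsub.nodup hpnd
  have hndB : RB.Nodup := by
    rw [hRB]
    exact (PySem.Dict.nodup_keys_ofList adm_link).filter _
  have hperm : RA.Perm RB :=
    (List.perm_ext_iff_of_nodup hndA hndB).2 (fun x => by rw [hmemA x, hmemB x])
  have hpermS : (PySem.List.sorted RA (fun x => x) false).Perm (PySem.List.sorted RB (fun x => x) false) :=
    ((PySem.List.sorted_perm RA _ _).trans hperm).trans (PySem.List.sorted_perm RB _ _).symm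
  exact List.Perm.eq_of_pairwise (fun a b _ _ h1 h2 => le_antisymm h1 h2)
    (PySem.List.sorted_pairwise RA (fun x => x)) (PySem.List.sorted_pairwise RB (fun x => x)) hpermS

-- ===== VERDICT (by name: the statement is the Claim_ definition above) =====
theorem CreateNestedLinks_spec : Claim_equal_CreateNestedLinks := by
  intro adm_link _hD hP
  unfold Spec_CreateNestedLinks CreateNestedLinks CreateNestedLinks_alt
  dsimp only
  rw [roots_eq adm_link]
  set d : PySem.Dict String String := PySem.Dict.ofList adm_link with hd
  have hroots : ∀ r ∈ PySem.List.sorted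
      (d.keys.filter (fun k => !(PySem.Set.contains (PySem.Set.ofList d.values) k))) (fun x => x) false,
      d.contains ((pvStep d)^[d.size] r) = false := by
    intro r hr
    rw [PySem.List.mem_sorted] at hr
    obtain ⟨h1, h2⟩ := List.mem_filter.1 hr
    refine hP r h1 (fun hv => ?_)
    have hc : PySem.Set.contains (PySem.Set.ofList d.values) r = true :=
      (PySem.Set.contains_iff _ _).2 ((PySem.Set.mem_ofList _ _).2 hv)
    rw [hc] at h2; cases h2
  rw [pvFoldB_eq d _ hroots (PySem.Dict.empty, PySem.Dict.empty)
      (fun k v hkv => by rw [PySem.Dict.get?_empty] at hkv; cases hkv)]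
  have hf : (fun (n : PySem.Dict String (List String)) root =>
        n.insert root (pvChainLoopA (PySem.Dict.ofList adm_link)
          ((PySem.Dict.ofList adm_link : PySem.Dict String String).size + 1) root [])) =
      (fun n r => n.insert r (pvCH (PySem.Dict.ofList adm_link) r)) :=
    funext fun n => funext fun r => by rw [pvChainLoopA_eq, List.nil_append]; rfl
  rw [hf]
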